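-- pv_equiv track=rewrite | github.com/Chenjiangwen/wen-mywork | 20_SparkTermPairCounter/project2_rdd.py | extract_term_pairs
-- ===== SOURCE A (Python) =====
-- def extract_term_pairs(line):
--     headline = line.split(',')[1]
--     words = headline.split()
--     pairs = []
--     for i in range(len(words)):
--         for j in range(i + 1, len(words)):
--             term1 = words[i].lower()
--             term2 = words[j].lower()
--
--             # Only consider pairs starting with letters
--             if term1[0].isalpha() and term2[0].isalpha():
--                 pairs.append(((term1, term2), 1))
--
--     return pairs
-- ===== SOURCE B (Python) =====
-- def extract_term_pairs(line):
--     headline = line.split(',')[1]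
--     terms = [w.lower() for w in headline.split() if w.lower()[0].isalpha()]
--     pairs = []
--     rest = terms
--     while rest:
--         first, rest = rest[0], rest[1:]
--         pairs += [((first, u), 1) for u in rest]
--     return pairs
-- ===== Notes on version B (the rewrite author's own statement) =====
-- stated objective: simpler
-- what changed: B first filters and lowercases the words in one pass, then emits all pairs of the filtered list by repeatedly peeling its head (combinations), removing A's index-based nested loops and the per-pair alpha guard.
import Mathlib
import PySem

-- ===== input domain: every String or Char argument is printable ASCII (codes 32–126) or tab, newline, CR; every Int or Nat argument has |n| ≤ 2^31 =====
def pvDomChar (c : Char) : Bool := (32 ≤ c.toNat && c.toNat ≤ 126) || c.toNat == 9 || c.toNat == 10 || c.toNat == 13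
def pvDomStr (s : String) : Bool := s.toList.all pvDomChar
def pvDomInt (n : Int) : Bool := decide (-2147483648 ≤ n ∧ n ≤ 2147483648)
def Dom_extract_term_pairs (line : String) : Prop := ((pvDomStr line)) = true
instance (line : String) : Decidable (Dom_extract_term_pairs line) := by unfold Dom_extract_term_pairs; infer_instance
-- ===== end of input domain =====

-- B replaces A's index-based nested loops (with a per-pair alpha guard) by one filter-and-lower
-- pass followed by a head-peeling pairing pass; same return value on every line containing a comma.

-- ===== PORT A =====
-- A, line by line: headline = line.split(',')[1]; words = headline.split(); nested index loops,
-- per-pair lowering and alpha guard, append.  ([1] out of range → Python raises; port uses a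
-- default "" there, excluded by Pre_.)
def extract_term_pairs (line : String) : List ((String × String) × Int) :=
  let headline := (PySem.List.pyGet? ((PySem.Str.split? line ",").getD []) 1).getD ""
  let words := PySem.Str.split₀ headline
  (PySem.List.pyRange 0 (PySem.List.len words)).foldl (fun pairs i =>
    (PySem.List.pyRange (i + 1) (PySem.List.len words)).foldl (fun pairs j =>
      let term1 := PySem.Str.lower (PySem.List.pyGetD words i "")
      let term2 := PySem.Str.lower (PySem.List.pyGetD words j "")
      if PySem.Chars.isalpha ((PySem.Str.pyGet? term1 0).getD ' ')
          && PySem.Chars.isalpha ((PySem.Str.pyGet? term2 0).getD ' ') then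
        pairs ++ [((term1, term2), 1)]
      else pairs) pairs)
    []

-- ===== PORT B =====
-- B's pairing pass: while rest: first, rest = rest[0], rest[1:]; pairs += [((first,u),1) for u in rest]
def pvCombos (ts : List String) : List ((String × String) × Int) :=
  match ts with
  | [] => []
  | first :: rest => rest.map (fun u => ((first, u), 1)) ++ pvCombos rest

def extract_term_pairs_alt (line : String) : List ((String × String) × Int) :=
  let headline := (PySem.List.pyGet? ((PySem.Str.split? line ",").getD []) 1).getD ""
  let terms := (PySem.Str.split₀ headline).filterMap (fun w =>
    if PySem.Chars.isalpha ((PySem.Str.pyGet? (PySem.Str.lower w) 0).getD ' ') then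
      some (PySem.Str.lower w)
    else none)
  pvCombos terms

-- ===== PRECONDITION & SPEC =====
-- Pre_ excludes exactly the lines without a comma, where line.split(',')[1] raises IndexError in A (and in B).
def Pre_extract_term_pairs (line : String) : Prop := PySem.Str.isIn "," line = true
instance (line : String) : Decidable (Pre_extract_term_pairs line) := by unfold Pre_extract_term_pairs; infer_instance
def pvWitness_extract_term_pairs : String := "id7,Big apple 3pm Big news"
def Spec_extract_term_pairs (line : String) (out : List ((String × String) × Int)) : Prop := out = extract_term_pairs_alt line
instance (line : String) (out : List ((String × String) × Int)) : Decidable (Spec_extract_term_pairs line out) := by unfold Spec_extract_term_pairs; infer_instance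

-- ===== CLAIM (what is proved, stated in full; the proofs are below) =====
def Claim_equal_extract_term_pairs : Prop := ∀ (line : String), Dom_extract_term_pairs line → Pre_extract_term_pairs line → Spec_extract_term_pairs line (extract_term_pairs line)

-- ===== LEMMAS AND PROOFS =====

-- the word filter/transform both programs apply, as proof vocabulary
def pvKeep (w : String) : Bool :=
  PySem.Chars.isalpha ((PySem.Str.pyGet? (PySem.Str.lower w) 0).getD ' ')

def pvTerms (ws : List String) : List String :=
  ws.filterMap (fun w => if pvKeep w then some (PySem.Str.lower w) else none)

theorem pvTerms_cons (x : String) (xs : List String) :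
    pvTerms (x :: xs)
    = if pvKeep x then PySem.Str.lower x :: pvTerms xs else pvTerms xs := by
  by_cases hx : pvKeep x = true <;> simp [pvTerms, hx]

-- A's inner loop at a fixed first word, rewritten over the dropped suffix
theorem pv_inner_eq (w1 : String) (l : List String)
    (acc : List ((String × String) × Int)) :
    l.foldl (fun pairs w2 =>
      if pvKeep w1 && pvKeep w2 then
        pairs ++ [((PySem.Str.lower w1, PySem.Str.lower w2), 1)]
      else pairs) acc
    = acc ++ (if pvKeep w1 then
        (pvTerms l).map (fun t => ((PySem.Str.lower w1, t), 1)) else []) := by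
  induction l generalizing acc with
  | nil => simp [pvTerms]
  | cons x xs ih =>
      rw [List.foldl_cons, ih, pvTerms_cons]
      by_cases hw : pvKeep w1 = true <;> by_cases hx : pvKeep x = true <;>
        simp [hw, hx]

-- A's outer loop from index a equals pvCombos of the filtered dropped suffix
theorem pv_outer_eq (ws : List String) (a : Int) (ha : 0 ≤ a)
    (acc : List ((String × String) × Int)) :
    (PySem.List.pyRange a (PySem.List.len ws)).foldl (fun pairs i =>
      (PySem.List.pyRange (i + 1) (PySem.List.len ws)).foldl (fun pairs j =>
        let term1 := PySem.Str.lower (PySem.List.pyGetD ws i "")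
        let term2 := PySem.Str.lower (PySem.List.pyGetD ws j "")
        if PySem.Chars.isalpha ((PySem.Str.pyGet? term1 0).getD ' ')
            && PySem.Chars.isalpha ((PySem.Str.pyGet? term2 0).getD ' ') then
          pairs ++ [((term1, term2), 1)]
        else pairs) pairs) acc
    = acc ++ pvCombos (pvTerms (ws.drop a.toNat)) := by
  have hlen : PySem.List.len ws = (ws.length : Int) := rfl
  induction hn : ws.length - a.toNat generalizing a acc with
  | zero =>
      have h1 : PySem.List.pyRange a (PySem.List.len ws) = [] := by
        rw [hlen, PySem.List.pyRange_one]
        have h0 : ((ws.length : Int) - a).toNat = 0 := by omega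
        rw [h0]; rfl
      have h2 : ws.drop a.toNat = [] := List.drop_eq_nil_of_le (by omega)
      rw [h1, List.foldl_nil, h2]
      simp [pvTerms, pvCombos]
  | succ n ih =>
      have ha2 : a.toNat < ws.length := by omega
      have hab : a < PySem.List.len ws := by rw [hlen]; omega
      rw [PySem.List.pyRange_one_cons hab, List.foldl_cons]
      have hinner : (PySem.List.pyRange (a + 1) (PySem.List.len ws)).foldl
          (fun pairs j =>
            let term1 := PySem.Str.lower (PySem.List.pyGetD ws a "")
            let term2 := PySem.Str.lower (PySem.List.pyGetD ws j "")
            if PySem.Chars.isalpha ((PySem.Str.pyGet? term1 0).getD ' ')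
                && PySem.Chars.isalpha ((PySem.Str.pyGet? term2 0).getD ' ') then
              pairs ++ [((term1, term2), 1)]
            else pairs) acc
          = List.foldl (fun pairs w2 =>
              if pvKeep (PySem.List.pyGetD ws a "") && pvKeep w2 then
                pairs ++ [((PySem.Str.lower (PySem.List.pyGetD ws a ""),
                            PySem.Str.lower w2), 1)]
              else pairs) acc (ws.drop (a + 1).toNat) :=
        PySem.List.foldl_pyRange_pyGetD ws ""
          (fun pairs w2 =>
            if pvKeep (PySem.List.pyGetD ws a "") && pvKeep w2 then
              pairs ++ [((PySem.Str.lower (PySem.List.pyGetD ws a ""),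
                          PySem.Str.lower w2), 1)]
            else pairs) acc (by omega)
      rw [hinner, pv_inner_eq, ih (a + 1) (by omega) _ (by omega)]
      have hdrop : ws.drop a.toNat = ws[a.toNat] :: ws.drop (a.toNat + 1) :=
        List.drop_eq_getElem_cons ha2
      have hget : PySem.List.pyGetD ws a "" = ws[a.toNat] :=
        PySem.List.pyGetD_eq_getElem ws "" ha (by omega)
      have htn : (a + 1).toNat = a.toNat + 1 := by omega
      rw [htn, hdrop, pvTerms_cons, hget]
      by_cases hk : pvKeep ws[a.toNat] = true <;> simp [hk, pvCombos]

-- ===== VERDICT (by name: the statement is the Claim_ definition above) =====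
theorem extract_term_pairs_spec : Claim_equal_extract_term_pairs := by
  intro line _ _
  unfold Spec_extract_term_pairs extract_term_pairs extract_term_pairs_alt
  have h := pv_outer_eq (PySem.Str.split₀ ((PySem.List.pyGet?
      ((PySem.Str.split? line ",").getD []) 1).getD "")) 0 le_rfl []
  simpa [pvTerms, pvKeep] using h
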